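-- pv_equiv track=rewrite | github.com/marvin1099/OBS-Plugin-Manager | obs-plugin-manager.py | exact_query_plugin_data
-- ===== SOURCE A (Python) =====
-- def exact_query_plugin_data(data, query):
--     found_plugins = {}
--     online_plugins = data
--     special = None
--     priority = {"id":6,"url":5,"name":4,"description":3,"title":2,"author":1}
--     current_priority = 0
--     for plugin_id, plugin_infos in online_plugins.items():
--         for info_key, plugin_info in plugin_infos.items():
--             if info_key == "url":
--                 plugin_info = plugin_info.split("/")[-2]
--                 special = plugin_info.split(".")
--                 special = [".".join(special[:-1]), special[-1]]
--             if isinstance(plugin_info, str):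
--                 if query.lower() == plugin_info.lower():
--                     new_priority = priority.get(info_key,0)
--                     if new_priority >= current_priority:
--                         if new_priority > current_priority:
--                             found_plugins = {}
--                             current_priority = int(new_priority)
--                         found_plugins.update({plugin_id:plugin_infos})
--                 if special and query.lower() == special[0].lower():
--                     new_priority = priority.get("name")
--                     if new_priority >= current_priority:
--                         if new_priority > current_priority:
--                             found_plugins = {}
--                             current_priority = int(new_priority)
--                         found_plugins.update({plugin_id:plugin_infos})
--                 if special and query.lower() == special[1].lower():
--                     new_priority = priority.get("id")
--                     if new_priority >= current_priority:
--                         if new_priority > current_priority: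
--                             found_plugins = {}
--                             current_priority = int(new_priority)
--                         found_plugins.update({plugin_id:plugin_infos})
--             special = None
--
--     return found_plugins, current_priority
-- ===== SOURCE B (Python) =====
-- def exact_query_plugin_data(data, query):
--     priority = {"id": 6, "url": 5, "name": 4, "description": 3, "title": 2, "author": 1}
--     q = query.lower()
--     matches = []
--     for plugin_id, plugin_infos in data.items():
--         prios = set()
--         for info_key, value in plugin_infos.items():
--             if info_key == "url":
--                 segment = value.split("/")[-2]
--                 parts = segment.split(".")
--                 name_part = ".".join(parts[:-1])
--                 ext_part = parts[-1]
--                 if q == segment.lower():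
--                     prios.add(5)
--                 if q == name_part.lower():
--                     prios.add(4)
--                 if q == ext_part.lower():
--                     prios.add(6)
--             elif q == value.lower():
--                 prios.add(priority.get(info_key, 0))
--         matches.append((plugin_id, plugin_infos, prios))
--     current_priority = max((p for _, _, s in matches for p in s), default=0)
--     found_plugins = {pid: infos for pid, infos, s in matches if current_priority in s}
--     return found_plugins, current_priority
-- ===== Notes on version B (the rewrite author's own statement) =====
-- stated objective: simpler
-- what changed: A keeps a running best priority and destructively resets the result dict whenever a higher-priority match appears, recomputing query.lower() at every comparison; B records each plugin's set of matching priorities in one pass with the query lowered once, then takes the overall maximum (default 0) and collects the plugins attaining it.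
import Mathlib
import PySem

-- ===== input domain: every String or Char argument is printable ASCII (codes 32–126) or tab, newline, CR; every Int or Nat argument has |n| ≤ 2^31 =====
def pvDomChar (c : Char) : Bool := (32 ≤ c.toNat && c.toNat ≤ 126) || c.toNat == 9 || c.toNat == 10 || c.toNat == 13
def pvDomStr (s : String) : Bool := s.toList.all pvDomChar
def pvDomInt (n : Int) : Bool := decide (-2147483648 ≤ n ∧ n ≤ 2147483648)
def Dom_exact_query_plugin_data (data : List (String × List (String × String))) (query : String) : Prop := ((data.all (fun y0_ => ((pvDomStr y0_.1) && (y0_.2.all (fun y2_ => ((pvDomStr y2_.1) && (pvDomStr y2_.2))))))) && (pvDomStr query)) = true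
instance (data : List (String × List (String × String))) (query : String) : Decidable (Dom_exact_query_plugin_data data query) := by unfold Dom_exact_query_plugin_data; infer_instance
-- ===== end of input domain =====

-- B replaces A's single pass with destructive rescans of the result (reset found_plugins on a higher
-- priority) by a two-pass plan: record each plugin's set of matching priorities, take the overall max,
-- then collect the plugins that attain it — objective: simpler control flow, same exact result.

-- ===== PORT A =====
def pvPriority : PySem.Dict String Int :=
  PySem.Dict.ofList [("id", 6), ("url", 5), ("name", 4), ("description", 3), ("title", 2), ("author", 1)]

-- the repeated Python block: 'if new_priority >= current: (reset if higher); found.update({pid: infos})'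
def pvA_update (pid : String) (infos : List (String × String)) (np : Int)
    (st : PySem.Dict String (List (String × String)) × Int) :
    PySem.Dict String (List (String × String)) × Int :=
  if np ≥ st.2 then
    if np > st.2 then (PySem.Dict.empty.insert pid infos, np)
    else (st.1.insert pid infos, st.2)
  else st

def pvA_step (query : String) (pid : String) (infos : List (String × String))
    (st : PySem.Dict String (List (String × String)) × Int × Option (String × String))
    (kv : String × String) :
    PySem.Dict String (List (String × String)) × Int × Option (String × String) :=
  let found := st.1
  let current := st.2.1
  let special := st.2.2
  -- if info_key == "url": plugin_info = plugin_info.split("/")[-2]; special = [name-part, ext-part]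
  let pinfo :=
    if kv.1 == "url" then (PySem.List.pyGet? (((PySem.Str.split? kv.2 "/").getD [])) (-2)).getD "" else kv.2
  let special :=
    if kv.1 == "url" then
      let parts := ((PySem.Str.split? pinfo ".").getD [])
      some (PySem.Str.join "." (PySem.List.slice parts none (some (-1))),
            (PySem.List.pyGet? parts (-1)).getD "")
    else special
  let s1 :=
    if PySem.Str.lower query == PySem.Str.lower pinfo then
      pvA_update pid infos (pvPriority.getD kv.1 0) (found, current)
    else (found, current)
  let s3 :=
    match special with
    | none => s1
    | some sp =>
      let s2 :=
        if PySem.Str.lower query == PySem.Str.lower sp.1 then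
          pvA_update pid infos (pvPriority.getD "name" 0) s1
        else s1
      if PySem.Str.lower query == PySem.Str.lower sp.2 then
        pvA_update pid infos (pvPriority.getD "id" 0) s2
      else s2
  (s3.1, s3.2, none)  -- special = None at the end of every field iteration

def exact_query_plugin_data (data : List (String × List (String × String))) (query : String) :
    (List (String × List (String × String))) × Int :=
  let st := data.foldl (fun st pl => pl.2.foldl (pvA_step query pl.1 pl.2) st)
    ((PySem.Dict.empty : PySem.Dict String (List (String × String))), (0 : Int),
     (none : Option (String × String)))
  (st.1.items, st.2.1)

-- ===== PORT B =====
def pvB_fieldStep (q : String) (s : PySem.Set Int) (kv : String × String) : PySem.Set Int :=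
  if kv.1 == "url" then
    let segment := (PySem.List.pyGet? (((PySem.Str.split? kv.2 "/").getD [])) (-2)).getD ""
    let parts := ((PySem.Str.split? segment ".").getD [])
    let namePart := PySem.Str.join "." (PySem.List.slice parts none (some (-1)))
    let extPart := (PySem.List.pyGet? parts (-1)).getD ""
    let s := if q == PySem.Str.lower segment then PySem.Set.add s 5 else s
    let s := if q == PySem.Str.lower namePart then PySem.Set.add s 4 else s
    if q == PySem.Str.lower extPart then PySem.Set.add s 6 else s
  else if q == PySem.Str.lower kv.2 then PySem.Set.add s (pvPriority.getD kv.1 0) else s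

def exact_query_plugin_data_alt (data : List (String × List (String × String))) (query : String) :
    (List (String × List (String × String))) × Int :=
  let q := PySem.Str.lower query
  let ms := data.map (fun pl => (pl.1, pl.2, pl.2.foldl (pvB_fieldStep q) (PySem.Set.empty : PySem.Set Int)))
  let current := ms.foldl (fun (m : Int) t => t.2.2.foldl max m) 0
  let found := ms.foldl
    (fun (d : PySem.Dict String (List (String × String))) t =>
      if PySem.Set.contains t.2.2 current then d.insert t.1 t.2.1 else d)
    PySem.Dict.empty
  (found.items, current)

-- ===== PRECONDITION & SPEC =====
-- Pre_ excludes inputs where some "url" field value contains no '/': there Python A raises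
-- IndexError on plugin_info.split("/")[-2] (it never returns).
def Pre_exact_query_plugin_data (data : List (String × List (String × String))) (query : String) : Prop :=
  ∀ pl ∈ data, ∀ kv ∈ pl.2, kv.1 = "url" → '/' ∈ kv.2.toList
instance (data : List (String × List (String × String))) (query : String) : Decidable (Pre_exact_query_plugin_data data query) := by unfold Pre_exact_query_plugin_data; infer_instance

def pvWitness_exact_query_plugin_data : (List (String × List (String × String))) × String :=
  ([("p1", [("name", "Foo"), ("url", "http://x.org/foo.zip/")]), ("p2", [("name", "bar")])], "foo")

def Spec_exact_query_plugin_data (data : List (String × List (String × String))) (query : String) (out : (List (String × List (String × String))) × Int) : Prop := out = exact_query_plugin_data_alt data query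
instance (data : List (String × List (String × String))) (query : String) (out : (List (String × List (String × String))) × Int) : Decidable (Spec_exact_query_plugin_data data query out) := by unfold Spec_exact_query_plugin_data; infer_instance

-- ===== CLAIM (what is proved, stated in full; the proofs are below) =====
def Claim_equal_exact_query_plugin_data : Prop := ∀ (data : List (String × List (String × String))) (query : String), Dom_exact_query_plugin_data data query → Pre_exact_query_plugin_data data query → Spec_exact_query_plugin_data data query (exact_query_plugin_data data query)

-- ===== LEMMAS AND PROOFS =====

-- the list of priorities at which one field ms the (lowered) query, in A's testing order
def pvML (q : String) (kv : String × String) : List Int :=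
  if kv.1 == "url" then
    let segment := (PySem.List.pyGet? (((PySem.Str.split? kv.2 "/").getD [])) (-2)).getD ""
    let parts := ((PySem.Str.split? segment ".").getD [])
    let namePart := PySem.Str.join "." (PySem.List.slice parts none (some (-1)))
    let extPart := (PySem.List.pyGet? parts (-1)).getD ""
    (if q == PySem.Str.lower segment then [(5 : Int)] else []) ++
    (if q == PySem.Str.lower namePart then [(4 : Int)] else []) ++
    (if q == PySem.Str.lower extPart then [(6 : Int)] else [])
  else if q == PySem.Str.lower kv.2 then [pvPriority.getD kv.1 0] else []

def pvMLs (q : String) (infos : List (String × String)) : List Int := infos.flatMap (pvML q)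

-- one match at priority p, as A performs it (fold-friendly argument order)
def pvStep1 (pid : String) (infos : List (String × String))
    (st : PySem.Dict String (List (String × String)) × Int) (p : Int) :
    PySem.Dict String (List (String × String)) × Int :=
  pvA_update pid infos p st

def pvCur (q : String) (ds : List (String × List (String × String))) : Int :=
  ds.foldl (fun (m : Int) pl => (pvMLs q pl.2).foldl max m) 0

def pvFound (q : String) (ds : List (String × List (String × String))) (c : Int) :
    PySem.Dict String (List (String × String)) :=
  ds.foldl (fun d pl => if c ∈ pvMLs q pl.2 then d.insert pl.1 pl.2 else d) PySem.Dict.empty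

lemma pv_foldl_max_const {L : List Int} {c : Int} (h : ∀ p ∈ L, p ≤ c) : L.foldl max c = c := by
  induction L generalizing c with
  | nil => rfl
  | cons x t ih =>
    simp only [List.foldl_cons]
    rw [max_eq_left (h x (by simp))]
    exact ih (fun p hp => h p (by simp [hp]))

lemma pv_chunk (pid : String) (infos : List (String × String)) (b : Bool) (np : Int)
    (st : PySem.Dict String (List (String × String)) × Int) :
    (if b then pvA_update pid infos np st else st)
      = (if b then [np] else []).foldl (pvStep1 pid infos) st := by
  cases b <;> rfl

lemma pv_field_step (query pid : String) (infos : List (String × String))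
    (f : PySem.Dict String (List (String × String))) (c : Int) (kv : String × String) :
    pvA_step query pid infos (f, c, none) kv =
      (((pvML (PySem.Str.lower query) kv).foldl (pvStep1 pid infos) (f, c)).1,
       ((pvML (PySem.Str.lower query) kv).foldl (pvStep1 pid infos) (f, c)).2, none) := by
  have h5 : pvPriority.getD "url" 0 = 5 := by decide
  have h4 : pvPriority.getD "name" 0 = 4 := by decide
  have h6 : pvPriority.getD "id" 0 = 6 := by decide
  by_cases hk : kv.1 == "url"
  · have hk' : kv.1 = "url" := by simpa using hk
    simp only [pvA_step, pvML, hk', beq_self_eq_true, if_true, h5, h4, h6,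
      pv_chunk, List.foldl_append]
  · simp only [pvA_step, pvML, hk, Bool.false_eq_true, if_false,
      pv_chunk]

lemma pv_stepAll (pid : String) (infos : List (String × String)) :
    ∀ (L : List Int) (f : PySem.Dict String (List (String × String))) (c : Int),
    L.foldl (pvStep1 pid infos) (f, c) =
      if ∃ p ∈ L, c ≤ p then
        ((if ∃ p ∈ L, c < p then PySem.Dict.empty else f).insert pid infos, L.foldl max c)
      else (f, c) := by
  intro L
  induction L with
  | nil =>
    intro f c
    simp
  | cons p t ih =>
    intro f c
    simp only [List.foldl_cons]
    rcases lt_trichotomy p c with hlt | heq | hgt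
    · have hs : pvStep1 pid infos (f, c) p = (f, c) := by
        simp only [pvStep1, pvA_update]; rw [if_neg (by simp; omega)]
      rw [hs, ih]
      have h1 : (∃ q ∈ p :: t, c ≤ q) ↔ (∃ q ∈ t, c ≤ q) := by
        constructor
        · rintro ⟨x, hx, hcx⟩
          rcases List.mem_cons.mp hx with rfl | hx
          · omega
          · exact ⟨x, hx, hcx⟩
        · rintro ⟨x, hx, hcx⟩
          exact ⟨x, List.mem_cons_of_mem _ hx, hcx⟩
      have h2 : (∃ q ∈ p :: t, c < q) ↔ (∃ q ∈ t, c < q) := by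
        constructor
        · rintro ⟨x, hx, hcx⟩
          rcases List.mem_cons.mp hx with rfl | hx
          · omega
          · exact ⟨x, hx, hcx⟩
        · rintro ⟨x, hx, hcx⟩
          exact ⟨x, List.mem_cons_of_mem _ hx, hcx⟩
      simp only [max_eq_left hlt.le]
      by_cases hA : ∃ q ∈ t, c ≤ q
      · rw [if_pos hA, if_pos (h1.mpr hA)]
        by_cases hB : ∃ q ∈ t, c < q
        · rw [if_pos hB, if_pos (h2.mpr hB)]
        · rw [if_neg hB, if_neg (fun hx => hB (h2.mp hx))]
      · rw [if_neg hA, if_neg (fun hx => hA (h1.mp hx))]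
    · subst heq
      have hs : pvStep1 pid infos (f, p) p = (f.insert pid infos, p) := by
        simp [pvStep1, pvA_update]
      rw [hs, ih]
      have hout : (∃ q ∈ p :: t, p ≤ q) := ⟨p, by simp⟩
      rw [if_pos hout]
      have hlt2 : (∃ q ∈ p :: t, p < q) ↔ (∃ q ∈ t, p < q) := by
        constructor
        · rintro ⟨x, hx, hcx⟩
          rcases List.mem_cons.mp hx with rfl | hx
          · omega
          · exact ⟨x, hx, hcx⟩
        · rintro ⟨x, hx, hcx⟩
          exact ⟨x, List.mem_cons_of_mem _ hx, hcx⟩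
      simp only [max_self]
      by_cases hA : ∃ q ∈ t, p ≤ q
      · rw [if_pos hA]
        by_cases hB : ∃ q ∈ t, p < q
        · rw [if_pos hB, if_pos (hlt2.mpr hB)]
        · rw [if_neg hB, if_neg (fun hx => hB (hlt2.mp hx))]
          rw [PySem.Dict.insert_insert_self]
      · rw [if_neg hA, if_neg (fun hx => hA ((hlt2.mp hx).elim (fun x hx2 => ⟨x, hx2.1, hx2.2.le⟩)))]
        have hle : ∀ q ∈ t, q ≤ p := by
          intro q hq
          by_contra hc2
          exact hA ⟨q, hq, by omega⟩
        rw [pv_foldl_max_const hle]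
    · have hs : pvStep1 pid infos (f, c) p = (PySem.Dict.empty.insert pid infos, p) := by
        simp only [pvStep1, pvA_update]
        rw [if_pos (by simp; omega), if_pos (by simpa using hgt)]
      rw [hs, ih]
      have hout : (∃ q ∈ p :: t, c ≤ q) := ⟨p, by simp, hgt.le⟩
      have hout2 : (∃ q ∈ p :: t, c < q) := ⟨p, by simp, hgt⟩
      rw [if_pos hout, if_pos hout2]
      simp only [max_eq_right hgt.le]
      by_cases hA : ∃ q ∈ t, p ≤ q
      · rw [if_pos hA]
        by_cases hB : ∃ q ∈ t, p < q
        · rw [if_pos hB]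
        · rw [if_neg hB, PySem.Dict.insert_insert_self]
      · rw [if_neg hA]
        have hle : ∀ q ∈ t, q ≤ p := by
          intro q hq
          by_contra hc2
          exact hA ⟨q, hq, by omega⟩
        rw [pv_foldl_max_const hle]

lemma pv_inner (query pid : String) (infos : List (String × String)) :
    ∀ (l : List (String × String)) (f : PySem.Dict String (List (String × String))) (c : Int),
    l.foldl (pvA_step query pid infos) (f, c, none) =
      (((pvMLs (PySem.Str.lower query) l).foldl (pvStep1 pid infos) (f, c)).1,
       ((pvMLs (PySem.Str.lower query) l).foldl (pvStep1 pid infos) (f, c)).2, none) := by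
  intro l
  induction l with
  | nil =>
    intro f c
    rfl
  | cons kv t ih =>
    intro f c
    simp only [List.foldl_cons]
    rw [pv_field_step, ih]
    simp [pvMLs, List.foldl_append]

lemma pvCur_append (q : String) (ds : List (String × List (String × String)))
    (pl : String × List (String × String)) :
    pvCur q (ds ++ [pl]) = (pvMLs q pl.2).foldl max (pvCur q ds) := by
  simp [pvCur, List.foldl_append]

lemma pvFound_append (q : String) (ds : List (String × List (String × String)))
    (pl : String × List (String × String)) (c : Int) :
    pvFound q (ds ++ [pl]) c =
      if c ∈ pvMLs q pl.2 then (pvFound q ds c).insert pl.1 pl.2 else pvFound q ds c := by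
  simp [pvFound, List.foldl_append]

lemma pvFound_high (q : String) :
    ∀ (ds : List (String × List (String × String))) (c : Int),
    pvCur q ds < c → pvFound q ds c = PySem.Dict.empty := by
  intro ds
  induction ds using List.reverseRecOn with
  | nil =>
    intro c _
    rfl
  | append_singleton ds x ih =>
    intro c hc
    rw [pvFound_append]
    rw [pvCur_append] at hc
    have hnot : c ∉ pvMLs q x.2 := by
      intro hmem
      have := (PySem.List.le_foldl_max (pvMLs q x.2) (pvCur q ds)).2 c hmem
      omega
    rw [if_neg hnot]
    exact ih c (lt_of_le_of_lt (PySem.List.le_foldl_max _ _).1 hc)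

lemma pv_A_run (query : String) (ds : List (String × List (String × String))) :
    ds.foldl (fun st pl => pl.2.foldl (pvA_step query pl.1 pl.2) st)
      ((PySem.Dict.empty : PySem.Dict String (List (String × String))), (0 : Int),
       (none : Option (String × String))) =
    (pvFound (PySem.Str.lower query) ds (pvCur (PySem.Str.lower query) ds),
     pvCur (PySem.Str.lower query) ds, none) := by
  induction ds using List.reverseRecOn with
  | nil => rfl
  | append_singleton ds pl ih =>
    rw [List.foldl_append, ih]
    simp only [List.foldl_cons, List.foldl_nil]
    rw [pv_inner, pv_stepAll]
    set q := PySem.Str.lower query with hq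
    set C := pvCur q ds with hC
    set P := pvMLs q pl.2 with hP
    rw [pvCur_append, pvFound_append, ← hC, ← hP]
    by_cases hA : ∃ p ∈ P, C ≤ p
    · rw [if_pos hA]
      by_cases hB : ∃ p ∈ P, C < p
      · rw [if_pos hB]
        have hlt : C < P.foldl max C := by
          obtain ⟨p, hpm, hpl'⟩ := hB
          exact lt_of_lt_of_le hpl' ((PySem.List.le_foldl_max P C).2 p hpm)
        have hmem : P.foldl max C ∈ P := by
          rcases PySem.List.foldl_max_mem P C with h | h
          · omega
          · exact h
        rw [if_pos hmem, pvFound_high q ds _ hlt]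
      · rw [if_neg hB]
        have hle : ∀ p ∈ P, p ≤ C := by
          intro p hp
          by_contra hc2
          exact hB ⟨p, hp, by omega⟩
        rw [pv_foldl_max_const hle]
        have hmem : C ∈ P := by
          obtain ⟨p, hpm, hpl'⟩ := hA
          have : p = C := le_antisymm (hle p hpm) hpl'
          subst this
          exact hpm
        rw [if_pos hmem]
    · rw [if_neg hA]
      have hle : ∀ p ∈ P, p ≤ C := by
        intro p hp
        by_contra hc2
        exact hA ⟨p, hp, by omega⟩
      have hnm : C ∉ P := by
        intro hmem
        exact hA ⟨C, hmem, le_refl C⟩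
      rw [pv_foldl_max_const hle, if_neg hnm]

lemma pv_B_set (q : String) :
    ∀ (l : List (String × String)) (s : PySem.Set Int),
    l.foldl (pvB_fieldStep q) s = (l.flatMap (pvML q)).foldl PySem.Set.add s := by
  intro l
  induction l with
  | nil =>
    intro s
    rfl
  | cons kv t ih =>
    intro s
    simp only [List.foldl_cons, List.flatMap_cons, List.foldl_append]
    rw [ih]
    congr 1
    by_cases hk : kv.1 == "url"
    · simp only [pvB_fieldStep, pvML, hk, if_true]
      split_ifs <;> simp
    · simp only [pvB_fieldStep, pvML, hk]
      split_ifs <;> simp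

lemma pv_set_max :
    ∀ (L : List Int) (s : PySem.Set Int) (m : Int),
    (L.foldl PySem.Set.add s).foldl max m = L.foldl max (s.foldl max m) := by
  intro L
  induction L with
  | nil =>
    intro s m
    rfl
  | cons p t ih =>
    intro s m
    simp only [List.foldl_cons]
    rw [ih]
    congr 1
    by_cases hp : p ∈ s
    · rw [PySem.Set.add_of_mem hp]
      have := (PySem.List.le_foldl_max s m).2 p hp
      omega
    · rw [PySem.Set.add_of_not_mem hp]
      simp [List.foldl_append]

lemma pv_B_max (q : String) (l : List (String × String)) (m : Int) :
    (l.foldl (pvB_fieldStep q) (PySem.Set.empty : PySem.Set Int)).foldl max m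
      = (pvMLs q l).foldl max m := by
  rw [pv_B_set, pv_set_max]
  rfl

lemma pv_B_contains {α : Type} (q : String) (l : List (String × String)) (c : Int) (X Y : α) :
    (if PySem.Set.contains (l.foldl (pvB_fieldStep q) (PySem.Set.empty : PySem.Set Int)) c then X else Y)
      = if c ∈ pvMLs q l then X else Y := by
  rw [pv_B_set]
  have hof : (l.flatMap (pvML q)).foldl PySem.Set.add (PySem.Set.empty : PySem.Set Int)
      = PySem.Set.ofList (l.flatMap (pvML q)) := (PySem.Set.ofList_eq_foldl _).symm
  rw [hof]
  by_cases hc : c ∈ l.flatMap (pvML q)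
  · rw [if_pos (show c ∈ pvMLs q l from hc)]
    rw [if_pos (by simp [PySem.Set.mem_ofList, hc])]
  · rw [if_neg (show c ∉ pvMLs q l from hc)]
    rw [if_neg (by simp [PySem.Set.mem_ofList, hc])]

lemma pv_B_run (data : List (String × List (String × String))) (query : String) :
    exact_query_plugin_data_alt data query =
      ((pvFound (PySem.Str.lower query) data (pvCur (PySem.Str.lower query) data)).items,
       pvCur (PySem.Str.lower query) data) := by
  unfold exact_query_plugin_data_alt
  simp only [List.foldl_map]
  simp only [pv_B_max, pv_B_contains]
  rfl

-- ===== VERDICT (by name: the statement is the Claim_ definition above) =====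
theorem exact_query_plugin_data_spec : Claim_equal_exact_query_plugin_data := by
  intro data query _ _
  unfold Spec_exact_query_plugin_data
  rw [pv_B_run]
  unfold exact_query_plugin_data
  rw [pv_A_run]
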